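-- pv_equiv track=rewrite | github.com/K1ngcuber/AdventOfCode2022 | day3/main.py | part1
-- ===== SOURCE A (Python) =====
-- ALPHABET = 'abcdefghijklmnopqrstuvwxyzABCDEFGHIJKLMNOPQRSTUVWXYZ'
--
-- def part1(data):
--     result = 0
--
--     for line in data.splitlines():
--         # split string into two parts
--         part_one = line[:int(len(line)/2)]
--         part_two = line[int(len(line)/2):]
--
--         for letter in ALPHABET:
--             if letter in part_one and letter in part_two:
--                 result += ALPHABET.index(letter) + 1
--                 break
--
--     return result
-- ===== SOURCE B (Python) =====
-- ALPHABET = 'abcdefghijklmnopqrstuvwxyzABCDEFGHIJKLMNOPQRSTUVWXYZ'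
--
-- def part1(data):
--     total = 0
--     for line in data.splitlines():
--         half = len(line) // 2
--         common = set(line[:half]) & set(line[half:])
--         priorities = [ALPHABET.index(c) + 1 for c in common if c in ALPHABET]
--         if priorities:
--             total += min(priorities)
--     return total
-- ===== Notes on version B (the rewrite author's own statement) =====
-- stated objective: idiomatic
-- what changed: Replaces A's 52-iteration alphabet scan with first-hit break per line by a set intersection of the two halves followed by a min over letter priorities.
import Mathlib
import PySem

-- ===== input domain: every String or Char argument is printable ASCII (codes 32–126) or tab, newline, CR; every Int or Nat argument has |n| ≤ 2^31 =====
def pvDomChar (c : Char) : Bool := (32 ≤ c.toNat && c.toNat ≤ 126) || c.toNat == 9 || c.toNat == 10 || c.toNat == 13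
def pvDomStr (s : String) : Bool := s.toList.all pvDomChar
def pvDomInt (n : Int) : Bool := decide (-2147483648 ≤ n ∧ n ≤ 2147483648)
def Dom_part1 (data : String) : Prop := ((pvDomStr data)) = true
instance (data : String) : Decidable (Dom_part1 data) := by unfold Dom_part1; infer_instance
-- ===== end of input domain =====

-- B replaces A's per-line 52-letter alphabet scan-with-break by a set intersection of
-- the two halves and a min over letter priorities (objective: more idiomatic).

def pvALPHABET : List Char := "abcdefghijklmnopqrstuvwxyzABCDEFGHIJKLMNOPQRSTUVWXYZ".toList

-- ===== PORT A =====
-- A's inner 'for letter in ALPHABET: if … : result += ALPHABET.index(letter) + 1; break'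
-- (ALPHABET.index cannot raise here: letter is drawn from ALPHABET, so getD 0 is exact)
def part1Scan (partOne partTwo : List Char) : List Char → Int
  | [] => 0
  | letter :: rest =>
    if partOne.contains letter && partTwo.contains letter then
      (((PySem.List.index? pvALPHABET letter).getD 0 : Nat) : Int) + 1
    else part1Scan partOne partTwo rest

def part1 (data : String) : Int :=
  (PySem.Str.splitlines data).foldl (fun result line =>
    let cs := line.toList
    let partOne := PySem.List.slice cs none (some ((cs.length / 2 : Nat) : Int))
    let partTwo := PySem.List.slice cs (some ((cs.length / 2 : Nat) : Int)) none
    result + part1Scan partOne partTwo pvALPHABET) 0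

-- ===== PORT B =====
-- Source B's 'ALPHABET.index(c) + 1 ... if c in ALPHABET': the priority of c, none if not a letter
def pvPriority? (c : Char) : Option Int :=
  match PySem.List.index? pvALPHABET c with
  | some k => some ((k : Int) + 1)
  | none => none

def part1_alt (data : String) : Int :=
  (PySem.Str.splitlines data).foldl (fun total line =>
    let cs := line.toList
    let half := cs.length / 2
    let common := PySem.Set.inter (PySem.Set.ofList (cs.take half)) (PySem.Set.ofList (cs.drop half))
    let priorities := common.filterMap pvPriority?
    match PySem.List.min? priorities (fun x => x) with
    | some m => total + m
    | none => total) 0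

-- ===== PRECONDITION & SPEC =====
def Spec_part1 (data : String) (out : Int) : Prop := out = part1_alt data
instance (data : String) (out : Int) : Decidable (Spec_part1 data out) := by unfold Spec_part1; infer_instance

-- ===== CLAIM (what is proved, stated in full; the proofs are below) =====
def Claim_equal_part1 : Prop := ∀ (data : String), Dom_part1 data → Spec_part1 data (part1 data)

-- ===== LEMMAS AND PROOFS =====

theorem min?_id_eq_some_of {xs : List Int} {m : Int} (hm : m ∈ xs)
    (hleast : ∀ y ∈ xs, m ≤ y) : PySem.List.min? xs (fun x => x) = some m := by
  cases h : PySem.List.min? xs (fun x => x) with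
  | none =>
    rw [PySem.List.min?_eq_none_iff] at h
    subst h; simp at hm
  | some m' =>
    have h1 := PySem.List.min?_mem h
    have h2 := PySem.List.min?_isMin h m hm
    have h3 := hleast m' h1
    simp only [Option.some.injEq]
    omega

theorem part1Scan_eq_find (p1 p2 : List Char) (l : List Char) :
    part1Scan p1 p2 l =
      match l.find? (fun c => p1.contains c && p2.contains c) with
      | some c => (((PySem.List.index? pvALPHABET c).getD 0 : Nat) : Int) + 1
      | none => 0 := by
  induction l with
  | nil => rfl
  | cons c rest ih =>
    rw [List.find?_cons]
    by_cases h1 : c ∈ p1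
    · by_cases h2 : c ∈ p2
      · simp [part1Scan, h1, h2]
      · simp [part1Scan, h1, h2, ih]
    · simp [part1Scan, h1, ih]

theorem mem_pris_iff (p1 p2 : List Char) (x : Int) :
    x ∈ (PySem.Set.inter (PySem.Set.ofList p1) (PySem.Set.ofList p2)).filterMap pvPriority? ↔
      ∃ c, c ∈ p1 ∧ c ∈ p2 ∧ ∃ k, PySem.List.index? pvALPHABET c = some k ∧ x = (k : Int) + 1 := by
  constructor
  · intro hx
    rcases List.mem_filterMap.mp hx with ⟨c, hc, hp⟩
    rcases List.mem_filter.mp hc with ⟨hc1, hc2⟩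
    have hc1' : c ∈ p1 := (PySem.Set.mem_ofList p1 c).mp hc1
    have hc2' : c ∈ p2 := (PySem.Set.mem_ofList p2 c).mp
      ((PySem.Set.contains_iff _ c).mp hc2)
    unfold pvPriority? at hp
    cases hk : PySem.List.index? pvALPHABET c with
    | none => rw [hk] at hp; simp at hp
    | some k =>
      rw [hk] at hp
      simp only [Option.some.injEq] at hp
      exact ⟨c, hc1', hc2', k, hk, hp.symm⟩
  · rintro ⟨c, hc1, hc2, k, hk, hx⟩
    refine List.mem_filterMap.mpr ⟨c, ?_, ?_⟩
    · exact List.mem_filter.mpr ⟨(PySem.Set.mem_ofList p1 c).mpr hc1,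
        (PySem.Set.contains_iff _ c).mpr ((PySem.Set.mem_ofList p2 c).mpr hc2)⟩
    · unfold pvPriority?; rw [hk, hx]

-- the first hitter in ALPHABET order has the least index among all hitters
theorem index_le_of_first {hit : Char → Bool} {asl bsl : List Char} {c₀ c : Char} {k : Nat}
    (hsplit : pvALPHABET = asl ++ c₀ :: bsl) (hno : ∀ a ∈ asl, ¬ hit a = true)
    (hhit : hit c = true) (hk : PySem.List.index? pvALPHABET c = some k) :
    asl.length ≤ k := by
  by_contra hcon
  have hlt : k < asl.length := Nat.lt_of_not_le hcon
  rcases (PySem.List.index?_eq_some_iff _ _ _).mp hk with ⟨pre, suf, heq, hlen, -⟩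
  have h1 : pvALPHABET[k]? = some c := by
    rw [heq, ← hlen, List.getElem?_append_right (Nat.le_refl pre.length)]
    simp
  have h2 : pvALPHABET[k]? = asl[k]? := by
    rw [hsplit, List.getElem?_append_left hlt]
  have hmem : c ∈ asl := List.mem_of_getElem? (h2 ▸ h1)
  exact hno c hmem hhit

theorem scan_eq_min (p1 p2 : List Char) :
    part1Scan p1 p2 pvALPHABET =
      match PySem.List.min?
          ((PySem.Set.inter (PySem.Set.ofList p1) (PySem.Set.ofList p2)).filterMap pvPriority?)
          (fun x => x) with
      | some m => m
      | none => 0 := by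
  rw [part1Scan_eq_find]
  cases hfind : pvALPHABET.find? (fun c => p1.contains c && p2.contains c) with
  | none =>
    have hnil :
        (PySem.Set.inter (PySem.Set.ofList p1) (PySem.Set.ofList p2)).filterMap pvPriority? = [] := by
      rw [List.eq_nil_iff_forall_not_mem]
      intro x hx
      rcases (mem_pris_iff p1 p2 x).mp hx with ⟨c, hc1, hc2, k, hk, -⟩
      have hmem : c ∈ pvALPHABET := by
        by_contra hcm
        rw [← PySem.List.index?_eq_none_iff (xs := pvALPHABET)] at hcm
        rw [hcm] at hk; cases hk
      have hnot := List.find?_eq_none.mp hfind c hmem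
      apply hnot
      simp [hc1, hc2]
    rw [hnil]
    simp [PySem.List.min?]
  | some c₀ =>
    rcases List.find?_eq_some_iff_append.mp hfind with ⟨hhit, asl, bsl, hsplit, hno⟩
    have hno' : ∀ a ∈ asl, ¬ (p1.contains a && p2.contains a) = true := by
      intro a ha
      have hfa := hno a ha
      simp only [Bool.not_eq_true'] at hfa
      intro hcon
      rw [hfa] at hcon; cases hcon
    have hmem2 : c₀ ∈ p1 ∧ c₀ ∈ p2 := by simpa using hhit
    have hc₀as : c₀ ∉ asl := fun h => hno' c₀ h hhit
    have hidx : PySem.List.index? pvALPHABET c₀ = some asl.length :=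
      (PySem.List.index?_eq_some_iff _ _ _).mpr ⟨asl, bsl, hsplit, rfl, hc₀as⟩
    have hmemm : ((asl.length : Int) + 1) ∈
        (PySem.Set.inter (PySem.Set.ofList p1) (PySem.Set.ofList p2)).filterMap pvPriority? :=
      (mem_pris_iff p1 p2 _).mpr ⟨c₀, hmem2.1, hmem2.2, asl.length, hidx, rfl⟩
    have hleast : ∀ y ∈ (PySem.Set.inter (PySem.Set.ofList p1) (PySem.Set.ofList p2)).filterMap
          pvPriority?, (asl.length : Int) + 1 ≤ y := by
      intro y hy
      rcases (mem_pris_iff p1 p2 y).mp hy with ⟨c, hc1, hc2, k, hk, hyk⟩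
      have hle : asl.length ≤ k :=
        index_le_of_first (hit := fun c => p1.contains c && p2.contains c) hsplit hno'
          (by simp [hc1, hc2]) hk
      omega
    rw [min?_id_eq_some_of hmemm hleast]
    show (((PySem.List.index? pvALPHABET c₀).getD 0 : Nat) : Int) + 1 = (asl.length : Int) + 1
    rw [hidx]
    rfl

theorem foldl_eq_of_step (f g : Int → String → Int) (h : ∀ a l, f a l = g a l)
    (lines : List String) (acc : Int) :
    lines.foldl f acc = lines.foldl g acc := by
  induction lines generalizing acc with
  | nil => rfl
  | cons line rest ih => rw [List.foldl_cons, List.foldl_cons, h, ih]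

-- ===== VERDICT (by name: the statement is the Claim_ definition above) =====
theorem part1_spec : Claim_equal_part1 := by
  intro data _
  unfold Spec_part1 part1 part1_alt
  apply foldl_eq_of_step
  intro acc line
  simp only [PySem.List.slice_to_natCast, PySem.List.slice_from_natCast, scan_eq_min]
  cases PySem.List.min?
      ((PySem.Set.inter (PySem.Set.ofList (line.toList.take (line.toList.length / 2)))
          (PySem.Set.ofList (line.toList.drop (line.toList.length / 2)))).filterMap pvPriority?)
      (fun x => x) with
  | none => simp
  | some m => simp
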